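-- pv_equiv track=rewrite | github.com/autowarefoundation/scenario-simulator-failure-evaluation-tool | evaluate_failure_tool.py | split_log_info
-- ===== SOURCE A (Python) =====
-- def split_log_info(repo_log):
--     '''
--     Helper function that is used to split any git repository log message based on commit
--     Each commit log message is stored in any entery of log array
--
--     Arguments
--     ---------
--     repo_log : string
--         This is the text out of performing git log for a repository
--
--     Returns
--     -------
--     splitted_log_info : array of strings
--         array log info but splitted per commits, each commit log in one entry of the array
--     '''
--     delimiter = "\n\ncommit "
--     counter = 0
--     splitted_log_info = []
--     for x in repo_log.split(delimiter):
--         if counter == 0: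
--             splitted_log_info.append(x)
--             counter = counter + 1
--         else :
--             splitted_log_info.append("commit "+x)
--
--     return splitted_log_info
-- ===== SOURCE B (Python) =====
-- def split_log_info(repo_log):
--     '''Split a git log text into per-commit entries (same name/contract as A).
--     Iterative scan: cut the text just before each "commit " that follows a blank
--     line, instead of split-on-delimiter plus a counter loop that re-prepends
--     "commit ".'''
--     parts = []
--     s = repo_log
--     while True:
--         i = s.find("\n\ncommit ")
--         if i == -1:
--             parts.append(s)
--             return parts
--         parts.append(s[:i])
--         s = s[i + 2:]
-- ===== Notes on version B (the rewrite author's own statement) =====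
-- stated objective: alternative
-- what changed: Replaced split-on-delimiter plus a counter loop that re-prepends the delimiter's tail to every piece after the first with a single iterative scan that finds each blank-line-before-commit boundary and cuts the text there directly (find / slice / advance), so the counter flag and the string reconstruction disappear.
import Mathlib
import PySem

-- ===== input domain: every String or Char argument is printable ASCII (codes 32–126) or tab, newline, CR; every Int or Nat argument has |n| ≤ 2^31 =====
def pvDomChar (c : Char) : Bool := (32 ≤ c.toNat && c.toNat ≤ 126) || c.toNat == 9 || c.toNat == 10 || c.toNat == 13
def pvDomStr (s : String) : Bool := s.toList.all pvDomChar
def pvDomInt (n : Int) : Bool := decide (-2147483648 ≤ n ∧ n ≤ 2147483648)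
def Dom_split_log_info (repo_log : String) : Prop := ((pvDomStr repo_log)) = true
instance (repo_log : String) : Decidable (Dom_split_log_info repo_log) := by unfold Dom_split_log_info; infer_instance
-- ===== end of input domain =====

-- B replaces A's split-on-delimiter + counter loop (which re-prepends "commit " to every piece after the first)
-- by a single iterative find/cut scan; an alternative decomposition of the same task, same return value.


-- ===== PORT A =====
-- repo_log.split(delimiter) is PySem.Chars.splitOn (the separator is a non-empty literal, so Python's split never raises);
-- the for-loop with its counter is the foldl over (counter, splitted_log_info).
def split_log_info (repo_log : String) : List String :=
  let delimiter : List Char := "\n\ncommit ".toList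
  let step : (Nat × List (List Char)) → List Char → (Nat × List (List Char)) :=
    fun st x =>
      if st.1 = 0 then (st.1 + 1, st.2 ++ [x])
      else (st.1, st.2 ++ ["commit ".toList ++ x])
  ((PySem.Chars.splitOn repo_log.toList delimiter).foldl step (0, [])).2.map String.ofList

-- ===== PORT B =====
-- the while-loop of Source B: i = s.find("\n\ncommit "); append s[:i]; continue with s[i+2:]
-- (s[:i] and s[i+2:] with 0 ≤ i are List.take / List.drop on the character list)
def splitLogGo (acc : List (List Char)) (s : List Char) : List (List Char) :=
  let i := PySem.Chars.find s "\n\ncommit ".toList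
  if h : i = -1 then acc ++ [s]
  else splitLogGo (acc ++ [s.take i.toNat]) (s.drop (i.toNat + 2))
termination_by s.length
decreasing_by
  have hinf : "\n\ncommit ".toList <:+: s := (PySem.Chars.find_ne_neg_one_iff s _).mp h
  have hlen : ("\n\ncommit ".toList).length ≤ s.length := hinf.length_le
  simp only [List.length_drop]
  simp at hlen
  omega

def split_log_info_alt (repo_log : String) : List String :=
  (splitLogGo [] repo_log.toList).map String.ofList

-- ===== PRECONDITION & SPEC =====
def Spec_split_log_info (repo_log : String) (out : List String) : Prop := out = split_log_info_alt repo_log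
instance (repo_log : String) (out : List String) : Decidable (Spec_split_log_info repo_log out) := by unfold Spec_split_log_info; infer_instance

-- ===== CLAIM (what is proved, stated in full; the proofs are below) =====
def Claim_equal_split_log_info : Prop := ∀ (repo_log : String), Dom_split_log_info repo_log → Spec_split_log_info repo_log (split_log_info repo_log)

-- ===== LEMMAS AND PROOFS =====

theorem pv_find_eq_of (s sub : List Char) (k : Nat)
    (h1 : sub <+: s.drop k) (h2 : ∀ i < k, ¬ sub <+: s.drop i) :
    PySem.Chars.find s sub = (k : Int) := by
  have hinf : sub <:+: s := h1.isInfix.trans (s.drop_suffix k).isInfix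
  have hnn : 0 ≤ PySem.Chars.find s sub := (PySem.Chars.find_nonneg_iff s sub).mpr hinf
  obtain ⟨hp, hmin⟩ := PySem.Chars.find_spec hnn
  have : (PySem.Chars.find s sub).toNat = k := by
    rcases lt_trichotomy (PySem.Chars.find s sub).toNat k with h | h | h
    · exact absurd hp (h2 _ h)
    · exact h
    · exact absurd h1 (hmin k h)
  omega

theorem pv_find_cons (c : Char) (rest sub : List Char)
    (h : ¬ sub <+: (c :: rest)) :
    PySem.Chars.find (c :: rest) sub =
      (if PySem.Chars.find rest sub = -1 then -1 else PySem.Chars.find rest sub + 1) := by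
  split_ifs with hr
  · rw [PySem.Chars.find_eq_neg_one_iff]
    intro hinf
    obtain ⟨j, hj⟩ := (PySem.Chars.exists_prefix_drop_iff_isIn sub (c :: rest)).mpr
      ((PySem.Chars.isIn_iff_infix sub (c :: rest)).mpr hinf)
    match j with
    | 0 => exact h (by simpa using hj)
    | j + 1 =>
      have : sub <:+: rest := (by simpa using hj : sub <+: rest.drop j).isInfix.trans
        (rest.drop_suffix j).isInfix
      exact (PySem.Chars.find_eq_neg_one_iff rest sub).mp hr this
  · have hnn : 0 ≤ PySem.Chars.find rest sub := by
      have := PySem.Chars.neg_one_le_find rest sub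
      omega
    obtain ⟨hp, hmin⟩ := PySem.Chars.find_spec hnn
    have := pv_find_eq_of (c :: rest) sub ((PySem.Chars.find rest sub).toNat + 1)
      (by simpa using hp)
      (by
        intro i hi
        match i with
        | 0 => exact h ∘ (by simpa using ·)
        | i + 1 => exact fun hpre => hmin i (by omega) (by simpa using hpre))
    omega

def pvDelim : List Char := "\n\ncommit ".toList
def pvCommit : List Char := "commit ".toList

theorem pv_find_append (cs t : List Char) (hcs : ∀ c ∈ cs, c ≠ '\n') :
    PySem.Chars.find (cs ++ t) pvDelim =
      (if PySem.Chars.find t pvDelim = -1 then -1 else PySem.Chars.find t pvDelim + cs.length) := by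
  induction cs with
  | nil => simp
  | cons c cs ih =>
    have hc : c ≠ '\n' := hcs c (by simp)
    have hnp : ¬ pvDelim <+: (c :: (cs ++ t)) := by
      show ¬ ('\n' :: "\ncommit ".toList) <+: _
      rw [List.cons_prefix_cons]
      rintro ⟨h, -⟩
      exact hc h.symm
    rw [List.cons_append, pv_find_cons _ _ _ hnp, ih (fun x hx => hcs x (by simp [hx]))]
    have hb := PySem.Chars.neg_one_le_find t pvDelim
    simp only [List.length_cons]; push_cast; split_ifs <;> omega

def pvSplitF (s : List Char) : List (List Char) :=
  let i := PySem.Chars.find s pvDelim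
  if h : i = -1 then [s]
  else s.take i.toNat :: pvSplitF (s.drop (i.toNat + 9))
termination_by s.length
decreasing_by
  have hinf : pvDelim <:+: s := (PySem.Chars.find_ne_neg_one_iff s _).mp h
  have hlen : pvDelim.length ≤ s.length := hinf.length_le
  simp only [List.length_drop]
  simp [pvDelim] at hlen
  omega

def pvModH (p : List Char) : List (List Char) → List (List Char)
  | [] => [p]
  | h :: t => (p ++ h) :: t

theorem pvModH_pvModH (p q : List Char) (x : List (List Char)) :
    pvModH p (pvModH q x) = pvModH (p ++ q) x := by
  cases x <;> simp [pvModH]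

theorem pvSplitF_ne_nil (s : List Char) : pvSplitF s ≠ [] := by
  rw [pvSplitF.eq_def]
  by_cases h : PySem.Chars.find s pvDelim = -1 <;> simp [h]

theorem pvModH_nil (s : List Char) : pvModH [] (pvSplitF s) = pvSplitF s := by
  rcases hx : pvSplitF s with _ | ⟨h, t⟩
  · exact absurd hx (pvSplitF_ne_nil s)
  · simp [pvModH]

theorem pv_splitF_cons (c : Char) (rest : List Char) (hp : ¬ pvDelim <+: (c :: rest)) :
    pvSplitF (c :: rest) = pvModH [c] (pvSplitF rest) := by
  have hf := pv_find_cons c rest pvDelim hp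
  by_cases hr : PySem.Chars.find rest pvDelim = -1
  · rw [pvSplitF.eq_def, pvSplitF.eq_def]
    simp only [hr, if_pos, hf] at *
    simp [hf, hr, pvModH]
  · have hb := PySem.Chars.neg_one_le_find rest pvDelim
    have hnn : 0 ≤ PySem.Chars.find rest pvDelim := by omega
    rw [if_neg hr] at hf
    have h1 : ¬ PySem.Chars.find (c :: rest) pvDelim = -1 := by omega
    have ht : (PySem.Chars.find (c :: rest) pvDelim).toNat
        = (PySem.Chars.find rest pvDelim).toNat + 1 := by omega
    conv_lhs => rw [pvSplitF.eq_def]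
    conv_rhs => rw [pvSplitF.eq_def]
    simp only [h1, hr, dite_false]
    rw [ht, show (PySem.Chars.find rest pvDelim).toNat + 1 + 9
        = ((PySem.Chars.find rest pvDelim).toNat + 9) + 1 from by omega,
      List.drop_succ_cons, List.take_succ_cons]
    simp [pvModH]

theorem pv_go_spec (fuel : Nat) :
    ∀ (l cur : List Char) (acc : List (List Char)), l.length < fuel →
      PySem.Chars.splitOn.go pvDelim fuel l cur acc =
        acc.reverse ++ pvModH cur.reverse (pvSplitF l) := by
  induction fuel with
  | zero => intro l cur acc h; omega
  | succ fuel ih =>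
    intro l cur acc h
    match l with
    | [] =>
      have hnil : pvSplitF [] = [[]] := by
        rw [pvSplitF.eq_def]
        have : PySem.Chars.find [] pvDelim = -1 := by
          rw [PySem.Chars.find_eq_neg_one_iff]
          simp [pvDelim]
        simp [this]
      simp [PySem.Chars.splitOn.go, hnil, pvModH]
    | c :: rest =>
      by_cases hp : pvDelim.isPrefixOf (c :: rest)
      · have hpre : pvDelim <+: (c :: rest) := List.isPrefixOf_iff_prefix.mp hp
        have hf0 : PySem.Chars.find (c :: rest) pvDelim = 0 :=
          pv_find_eq_of _ _ 0 (by simpa using hpre) (by omega)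
        have hlen9 : pvDelim.length ≤ (c :: rest).length := hpre.length_le
        have h9 : pvDelim.length = 9 := by decide
        rw [show PySem.Chars.splitOn.go pvDelim (fuel + 1) (c :: rest) cur acc
            = PySem.Chars.splitOn.go pvDelim fuel ((c :: rest).drop pvDelim.length) []
                (cur.reverse :: acc) from by
          conv_lhs => rw [PySem.Chars.splitOn.go]
          simp [hp]]
        rw [ih _ _ _ (by simp at h hlen9 ⊢; omega)]
        rw [h9, show pvSplitF (c :: rest)
            = [] :: pvSplitF ((c :: rest).drop 9) from by
          rw [pvSplitF.eq_def]; simp [hf0]]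
        simp only [List.reverse_nil, List.reverse_cons, pvModH]
        simp
        rcases hxx : pvSplitF (List.drop 8 rest) with _ | ⟨h', t'⟩
        · exact absurd hxx (pvSplitF_ne_nil _)
        · simp
      · have hpre : ¬ pvDelim <+: (c :: rest) := fun hx =>
          hp (List.isPrefixOf_iff_prefix.mpr hx)
        rw [show PySem.Chars.splitOn.go pvDelim (fuel + 1) (c :: rest) cur acc
            = PySem.Chars.splitOn.go pvDelim fuel rest (c :: cur) acc from by
          conv_lhs => rw [PySem.Chars.splitOn.go]
          simp [hp]]
        rw [ih _ _ _ (by simp at h ⊢; omega)]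
        rw [pv_splitF_cons c rest hpre, pvModH_pvModH]
        simp

theorem pv_splitOn_eq (s : List Char) : PySem.Chars.splitOn s pvDelim = pvSplitF s := by
  show PySem.Chars.splitOn.go pvDelim (s.length + 1) s [] [] = _
  rw [pv_go_spec (s.length + 1) s [] [] (by omega)]
  simp [pvModH_nil]

theorem pvDelim_eq : "\n\ncommit ".toList = pvDelim := rfl
theorem pvCommit_eq : "commit ".toList = pvCommit := rfl
theorem pvDelim_len : pvDelim.length = 9 := by decide
theorem pvCommit_len : pvCommit.length = 7 := by decide
theorem pvDelim_split : pvDelim = '\n' :: '\n' :: pvCommit := by decide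

theorem pv_find_nil : PySem.Chars.find [] pvDelim = -1 := by
  rw [PySem.Chars.find_eq_neg_one_iff]
  simp [pvDelim]

theorem pv_find_len (s : List Char) (h : ¬ PySem.Chars.find s pvDelim = -1) :
    0 ≤ PySem.Chars.find s pvDelim ∧ 9 ≤ s.length := by
  have hinf : pvDelim <:+: s := (PySem.Chars.find_ne_neg_one_iff s _).mp h
  have h1 := (PySem.Chars.find_nonneg_iff s pvDelim).mpr hinf
  have h2 := hinf.length_le
  rw [pvDelim_len] at h2
  exact ⟨h1, h2⟩

theorem pv_go_acc_n (n : Nat) :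
    ∀ (s : List Char), s.length ≤ n → ∀ (acc : List (List Char)),
      splitLogGo acc s = acc ++ splitLogGo [] s := by
  induction n with
  | zero =>
    intro s h acc
    have hs : s = [] := List.length_eq_zero_iff.mp (by omega)
    subst hs
    rw [splitLogGo.eq_def, splitLogGo.eq_def]
    simp only [pvDelim_eq, pv_find_nil]
    simp
  | succ n ih =>
    intro s h acc
    by_cases hf : PySem.Chars.find s pvDelim = -1
    · conv_lhs => rw [splitLogGo.eq_def]
      conv_rhs => rw [splitLogGo.eq_def]
      simp only [pvDelim_eq, hf]
      simp
    · obtain ⟨hnn, hlen⟩ := pv_find_len s hf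
      have e1 := ih (s.drop ((PySem.Chars.find s pvDelim).toNat + 2)) (by simp; omega)
      conv_lhs => rw [splitLogGo.eq_def]
      conv_rhs => rw [splitLogGo.eq_def]
      simp only [pvDelim_eq, hf, dite_false]
      rw [e1 (acc ++ [List.take (PySem.Chars.find s pvDelim).toNat s]),
        e1 ([] ++ [List.take (PySem.Chars.find s pvDelim).toNat s])]
      simp

theorem pv_go_acc (s : List Char) (acc : List (List Char)) :
    splitLogGo acc s = acc ++ splitLogGo [] s :=
  pv_go_acc_n s.length s le_rfl acc

set_option maxRecDepth 8192 in
theorem pv_B_commit (t : List Char) :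
    splitLogGo [] (pvCommit ++ t) = pvModH pvCommit (splitLogGo [] t) := by
  have hcs : ∀ c ∈ pvCommit, c ≠ '\n' := by
    rw [show pvCommit = ['c','o','m','m','i','t',' '] from rfl]
    intro c hc
    fin_cases hc <;> decide
  have hf := pv_find_append pvCommit t hcs
  by_cases hr : PySem.Chars.find t pvDelim = -1
  · rw [if_pos hr] at hf
    have hL : splitLogGo [] (pvCommit ++ t) = [] ++ [pvCommit ++ t] := by
      rw [splitLogGo.eq_def]
      simp only [pvDelim_eq, hf]
      simp
    have hR : splitLogGo [] t = [] ++ [t] := by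
      rw [splitLogGo.eq_def]
      simp only [pvDelim_eq, hr]
      simp
    rw [hL, hR]
    simp [pvModH]
  · rw [if_neg hr, pvCommit_len] at hf
    obtain ⟨hnn, hlen⟩ := pv_find_len t hr
    have h1 : ¬ PySem.Chars.find (pvCommit ++ t) pvDelim = -1 := by omega
    have ht : (PySem.Chars.find (pvCommit ++ t) pvDelim).toNat
        = pvCommit.length + (PySem.Chars.find t pvDelim).toNat := by
      rw [pvCommit_len]; omega
    have hT : (pvCommit ++ t).take (pvCommit.length + (PySem.Chars.find t pvDelim).toNat)
        = pvCommit ++ t.take (PySem.Chars.find t pvDelim).toNat := by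
      rw [List.take_append]
      congr 1
      · exact List.take_of_length_le (by omega)
      · congr 1
        omega
    have hD : (pvCommit ++ t).drop
          (pvCommit.length + (PySem.Chars.find t pvDelim).toNat + 2)
        = t.drop ((PySem.Chars.find t pvDelim).toNat + 2) := by
      rw [List.drop_append, List.drop_eq_nil_of_le (by omega)]
      rw [List.nil_append]
      congr 1
      omega
    have hL : splitLogGo [] (pvCommit ++ t)
        = ([] ++ [pvCommit ++ t.take (PySem.Chars.find t pvDelim).toNat])
            ++ splitLogGo [] (t.drop ((PySem.Chars.find t pvDelim).toNat + 2)) := by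
      conv_lhs => rw [splitLogGo.eq_def]
      simp only [pvDelim_eq, h1, dite_false]
      rw [ht, hT, hD, pv_go_acc]
    have hR : splitLogGo [] t
        = ([] ++ [t.take (PySem.Chars.find t pvDelim).toNat])
            ++ splitLogGo [] (t.drop ((PySem.Chars.find t pvDelim).toNat + 2)) := by
      conv_lhs => rw [splitLogGo.eq_def]
      simp only [pvDelim_eq, hr, dite_false]
      rw [pv_go_acc]
    rw [hL, hR]
    simp [pvModH]

set_option maxRecDepth 8192 in
theorem pv_main_n (n : Nat) :
    ∀ (s : List Char), s.length ≤ n →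
      (pvSplitF s).headI :: ((pvSplitF s).tail.map (pvCommit ++ ·)) = splitLogGo [] s := by
  induction n with
  | zero =>
    intro s h
    have hs : s = [] := List.length_eq_zero_iff.mp (by omega)
    subst hs
    have hx : pvSplitF [] = [[]] := by
      rw [pvSplitF.eq_def]
      simp [pv_find_nil]
    have hg : splitLogGo [] ([] : List Char) = [] ++ [[]] := by
      rw [splitLogGo.eq_def]
      simp only [pvDelim_eq, pv_find_nil]
      simp
    rw [hx, hg]
    simp
  | succ n ih =>
    intro s h
    by_cases hf : PySem.Chars.find s pvDelim = -1
    · have hx : pvSplitF s = [s] := by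
        rw [pvSplitF.eq_def]
        simp [hf]
      have hg : splitLogGo [] s = [] ++ [s] := by
        rw [splitLogGo.eq_def]
        simp only [pvDelim_eq, hf]
        simp
      rw [hx, hg]
      simp
    · obtain ⟨hnn, hlen⟩ := pv_find_len s hf
      obtain ⟨hp, -⟩ := PySem.Chars.find_spec hnn
      obtain ⟨r, hr⟩ := hp
      have hlr : (PySem.Chars.find s pvDelim).toNat + 9 + r.length = s.length := by
        have := congrArg List.length hr
        simp [pvDelim_len] at this
        omega
      have hu : s.drop ((PySem.Chars.find s pvDelim).toNat + 9) = r := by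
        rw [← List.drop_drop, ← hr, ← pvDelim_len, List.drop_left]
      have h2 : s.drop ((PySem.Chars.find s pvDelim).toNat + 2) = pvCommit ++ r := by
        rw [← List.drop_drop, ← hr, pvDelim_split]
        simp
      have hxs : pvSplitF s
          = s.take (PySem.Chars.find s pvDelim).toNat
              :: pvSplitF (s.drop ((PySem.Chars.find s pvDelim).toNat + 9)) := by
        conv_lhs => rw [pvSplitF.eq_def]
        simp [hf]
      have hgs : splitLogGo [] s
          = ([] ++ [s.take (PySem.Chars.find s pvDelim).toNat])
              ++ splitLogGo [] (s.drop ((PySem.Chars.find s pvDelim).toNat + 2)) := by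
        conv_lhs => rw [splitLogGo.eq_def]
        simp only [pvDelim_eq, hf, dite_false]
        rw [pv_go_acc]
      rw [hxs, hu, hgs, h2, pv_B_commit, ← ih r (by omega)]
      rcases hx : pvSplitF r with _ | ⟨h', t'⟩
      · exact absurd hx (pvSplitF_ne_nil r)
      · simp [pvModH]

theorem pv_main (s : List Char) :
    (pvSplitF s).headI :: ((pvSplitF s).tail.map (pvCommit ++ ·)) = splitLogGo [] s :=
  pv_main_n s.length s le_rfl

theorem pv_fold_tail (t : List (List Char)) (acc : List (List Char)) :
    (t.foldl (fun (st : Nat × List (List Char)) x =>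
      if st.1 = 0 then (st.1 + 1, st.2 ++ [x])
      else (st.1, st.2 ++ ["commit ".toList ++ x])) (1, acc)).2
      = acc ++ t.map (pvCommit ++ ·) := by
  induction t generalizing acc with
  | nil => simp
  | cons x t ih =>
    simp only [List.foldl_cons, List.map_cons]
    rw [if_neg (by omega)]
    rw [ih]
    simp [pvCommit_eq]

theorem pv_final (repo_log : String) :
    split_log_info repo_log = split_log_info_alt repo_log := by
  simp only [split_log_info, split_log_info_alt, pvDelim_eq]
  rw [pv_splitOn_eq]
  rcases hx : pvSplitF repo_log.toList with _ | ⟨h, t⟩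
  · exact absurd hx (pvSplitF_ne_nil _)
  · have hm := pv_main repo_log.toList
    rw [hx] at hm
    simp only [List.headI, List.tail] at hm
    rw [← hm]
    simp only [List.foldl_cons]
    norm_num
    rw [pv_fold_tail]
    simp

-- ===== VERDICT (by name: the statement is the Claim_ definition above) =====
theorem split_log_info_spec : Claim_equal_split_log_info := by
  intro repo_log _
  show split_log_info repo_log = split_log_info_alt repo_log
  exact pv_final repo_log
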